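-- pv_equiv track=rewrite | github.com/tzou2024/aOc | 2023/day3/script.py | get_islands
-- ===== SOURCE A (Python) =====
-- def get_line_island(line):
--     #return list of tuples of start and end of islands in a list
--     onnumber = False
--     starts = []
--     ends = []
--     i = 0
--     while i < len(line):
--         if line[i].isdigit():
--             starts.append(i)
--             while line[i].isdigit():
--                 i+=1
--                 if i == len(line):
--                     break
--             ends.append(i-1)
--         i += 1
--     combos = []
--     for (a,b) in zip(starts, ends):
--         combos.append((a,b))
--     return combos
--
-- def get_islands(gameboard):
--     bomblist = []
--     for i in range(len(gameboard)):
--         combos = get_line_island(gameboard[i])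
--         for (x, y) in combos:
--             realx = x + i*len(gameboard)
--             realy = y + i*len(gameboard)
--             bomblist.append((realx, realy))
--     return bomblist
-- ===== SOURCE B (Python) =====
-- def get_islands(gameboard):
--     n = len(gameboard)
--     out = []
--     for i, line in enumerate(gameboard):
--         d = [c.isdigit() for c in line]
--         m = len(line)
--         starts = [j for j in range(m) if d[j] and (j == 0 or not d[j - 1])]
--         ends = [j for j in range(m) if d[j] and (j == m - 1 or not d[j + 1])]
--         out += [(a + i * n, b + i * n) for a, b in zip(starts, ends)]
--     return out
-- ===== Notes on version B (the rewrite author's own statement) =====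
-- stated objective: alternative
-- what changed: Replaced A's stateful two-level while-loop scanner (which walks each line skipping over digit runs) with stateless boundary detection: per line precompute the digit mask, take starts = positions where a digit's left neighbour is not a digit, ends = positions where its right neighbour is not, and zip them.
import Mathlib
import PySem

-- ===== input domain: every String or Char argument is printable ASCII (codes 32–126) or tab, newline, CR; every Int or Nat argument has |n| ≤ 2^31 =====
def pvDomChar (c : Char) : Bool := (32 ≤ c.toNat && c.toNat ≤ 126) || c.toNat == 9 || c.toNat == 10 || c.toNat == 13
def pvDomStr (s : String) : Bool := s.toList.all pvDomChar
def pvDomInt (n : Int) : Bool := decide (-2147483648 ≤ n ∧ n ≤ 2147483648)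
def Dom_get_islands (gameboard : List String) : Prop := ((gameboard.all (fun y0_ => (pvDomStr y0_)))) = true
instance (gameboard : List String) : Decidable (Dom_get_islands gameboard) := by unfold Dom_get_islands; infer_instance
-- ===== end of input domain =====

-- B replaces A's stateful two-level while scanner with stateless boundary detection: per line it
-- precomputes the digit mask and filters range(m) for run starts (digit whose predecessor is not)
-- and run ends (digit whose successor is not), then zips them; objective: alternative, same value.

-- ===== PORT A =====
-- inner `while line[i].isdigit(): i += 1; if i == len(line): break` (entered with i in range);
-- out-of-range getD yields ' ' which is not a digit, exactly Python's guaranteed in-range access.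
def pyInnerWhile (cs : List Char) (i : Nat) : Nat :=
  if PySem.Chars.isdigit (cs.getD i ' ') then
    if i + 1 = cs.length then i + 1
    else pyInnerWhile cs (i + 1)
  else i
termination_by cs.length - i
decreasing_by
  rename_i hd hne
  have hlt : i < cs.length := by
    by_contra hge
    rw [List.getD_eq_default _ _ (by omega)] at hd
    simp [PySem.Chars.isdigit] at hd
  omega

-- the port's termination argument for the outer loop cites this (i ≤ pyInnerWhile cs i)
theorem pyInnerWhile_ge (cs : List Char) (i : Nat) : i ≤ pyInnerWhile cs i := by
  unfold pyInnerWhile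
  split
  · split
    · omega
    · have := pyInnerWhile_ge cs (i + 1); omega
  · omega
termination_by cs.length - i
decreasing_by
  rename_i hd hne
  have hlt : i < cs.length := by
    by_contra hge
    rw [List.getD_eq_default _ _ (by omega)] at hd
    simp [PySem.Chars.isdigit] at hd
  omega

-- outer `while i < len(line)` of get_line_island, returning (starts, ends)
def pyOuterWhile (cs : List Char) (i : Nat) : List Nat × List Nat :=
  if i < cs.length then
    if PySem.Chars.isdigit (cs.getD i ' ') then
      let j := pyInnerWhile cs i
      let se := pyOuterWhile cs (j + 1)
      (i :: se.1, (j - 1) :: se.2)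
    else pyOuterWhile cs (i + 1)
  else ([], [])
termination_by cs.length - i
decreasing_by
  · have := pyInnerWhile_ge cs i; omega
  · omega

def get_line_island (line : String) : List (Nat × Nat) :=
  let se := pyOuterWhile line.toList 0
  (se.1.zip se.2).foldl (fun combos ab => combos ++ [ab]) []

def get_islands (gameboard : List String) : List (Int × Int) :=
  (PySem.List.pyRange 0 (gameboard.length : Int) 1).foldl (fun bomblist i =>
    (get_line_island (PySem.List.pyGetD gameboard i "")).foldl
      (fun bl xy =>
        bl ++ [((xy.1 : Int) + i * (gameboard.length : Int),
                (xy.2 : Int) + i * (gameboard.length : Int))]) bomblist) []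

-- ===== PORT B =====
-- Source B per line: d = [c.isdigit() for c in line]; starts/ends are comprehensions over range(m)
-- keeping j where d[j] holds and the left/right neighbour does not (short-circuited at 0 / m-1);
-- out-of-range d.getD is never reached by the short circuit, so getD false is exact.
def bLineSpans (line : String) : List (Nat × Nat) :=
  let cs := line.toList
  let d := cs.map PySem.Chars.isdigit
  let m := cs.length
  let starts := (List.range m).filter (fun j => d.getD j false && (decide (j = 0) || !(d.getD (j - 1) false)))
  let ends := (List.range m).filter (fun j => d.getD j false && (decide (j = m - 1) || !(d.getD (j + 1) false)))
  starts.zip ends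

def get_islands_alt (gameboard : List String) : List (Int × Int) :=
  let n := gameboard.length
  (PySem.List.enumerate gameboard).flatMap (fun il =>
    (bLineSpans il.2).map (fun ab =>
      ((ab.1 : Int) + il.1 * (n : Int), (ab.2 : Int) + il.1 * (n : Int))))

-- ===== PRECONDITION & SPEC =====
def Spec_get_islands (gameboard : List String) (out : List (Int × Int)) : Prop := out = get_islands_alt gameboard
instance (gameboard : List String) (out : List (Int × Int)) : Decidable (Spec_get_islands gameboard out) := by unfold Spec_get_islands; infer_instance

-- ===== CLAIM (what is proved, stated in full; the proofs are below) =====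
def Claim_equal_get_islands : Prop := ∀ (gameboard : List String), Dom_get_islands gameboard → Spec_get_islands gameboard (get_islands gameboard)

-- ===== LEMMAS AND PROOFS =====

-- digit test at an arbitrary index, with Python's in-range guarantee modelled by getD
def Dg (cs : List Char) (j : Nat) : Bool := PySem.Chars.isdigit (cs.getD j ' ')

def predS (cs : List Char) (j : Nat) : Bool := Dg cs j && (decide (j = 0) || !Dg cs (j - 1))
def predE (cs : List Char) (j : Nat) : Bool := Dg cs j && (decide (j = cs.length - 1) || !Dg cs (j + 1))

theorem nondigit_of_ge (cs : List Char) (i : Nat) (h : cs.length ≤ i) : Dg cs i = false := by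
  unfold Dg
  rw [List.getD_eq_default _ _ h]; simp [PySem.Chars.isdigit]

-- first index ≥ p holding a non-digit (or cs.length): the value the inner while stops at
def firstStop (cs : List Char) (p : Nat) : Nat :=
  if Dg cs p then firstStop cs (p + 1) else p
termination_by cs.length - p
decreasing_by
  rename_i hd
  have hlt : p < cs.length := by
    by_contra hge
    rw [nondigit_of_ge cs p (by omega)] at hd
    exact absurd hd (by simp)
  omega

theorem firstStop_ge (cs : List Char) (p : Nat) : p ≤ firstStop cs p := by
  unfold firstStop
  split
  · have := firstStop_ge cs (p + 1); omega
  · omega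
termination_by cs.length - p
decreasing_by
  rename_i hd
  have hlt : p < cs.length := by
    by_contra hge
    rw [nondigit_of_ge cs p (by omega)] at hd
    exact absurd hd (by simp)
  omega

theorem firstStop_nondigit (cs : List Char) (p : Nat) : Dg cs (firstStop cs p) = false := by
  unfold firstStop
  split
  · exact firstStop_nondigit cs (p + 1)
  · rename_i hd; exact eq_false_of_ne_true hd
termination_by cs.length - p
decreasing_by
  rename_i hd
  have hlt : p < cs.length := by
    by_contra hge
    rw [nondigit_of_ge cs p (by omega)] at hd
    exact absurd hd (by simp)
  omega

theorem firstStop_digit (cs : List Char) (p j : Nat) (h1 : p ≤ j) (h2 : j < firstStop cs p) :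
    Dg cs j = true := by
  by_cases hd : Dg cs p = true
  · rcases Nat.eq_or_lt_of_le h1 with rfl | hlt
    · exact hd
    · have hfs : firstStop cs p = firstStop cs (p + 1) := by
        rw [firstStop, hd]; simp
      exact firstStop_digit cs (p + 1) j (by omega) (by rwa [← hfs])
  · have hfs : firstStop cs p = p := by
      rw [firstStop, eq_false_of_ne_true hd]; simp
    omega
termination_by cs.length - p
decreasing_by
  have hlt : p < cs.length := by
    by_contra hge
    rw [nondigit_of_ge cs p (by omega)] at hd
    exact absurd hd (by simp)
  omega

theorem firstStop_le (cs : List Char) (p : Nat) (h : p ≤ cs.length) : firstStop cs p ≤ cs.length := by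
  by_contra hgt
  have := firstStop_digit cs p cs.length h (by omega)
  rw [nondigit_of_ge cs cs.length (le_refl _)] at this
  exact absurd this (by simp)

theorem pyInnerWhile_eq_firstStop (cs : List Char) (i : Nat)
    (hd : Dg cs i = true) :
    pyInnerWhile cs i = firstStop cs (i + 1) := by
  unfold pyInnerWhile
  rw [show PySem.Chars.isdigit (cs.getD i ' ') = true from hd]
  simp only [if_true]
  by_cases h1 : i + 1 = cs.length
  · rw [if_pos h1]
    rw [firstStop, nondigit_of_ge cs (i + 1) (by omega)]
    simp
  · rw [if_neg h1]
    by_cases hd1 : Dg cs (i + 1) = true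
    · rw [pyInnerWhile_eq_firstStop cs (i + 1) hd1]
      conv_rhs => rw [firstStop, hd1]
      simp
    · rw [pyInnerWhile]
      rw [show PySem.Chars.isdigit (cs.getD (i+1) ' ') = false from eq_false_of_ne_true hd1]
      conv_rhs => rw [firstStop, eq_false_of_ne_true hd1]
      simp
termination_by cs.length - i
decreasing_by
  have hlt : i < cs.length := by
    by_contra hge
    rw [nondigit_of_ge cs i (by omega)] at hd
    exact absurd hd (by simp)
  omega

theorem filter_range'_nil (p : Nat → Bool) (a n : Nat)
    (h : ∀ j, a ≤ j → j < a + n → p j = false) :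
    (List.range' a n).filter p = [] := by
  rw [List.filter_eq_nil_iff]
  intro j hj
  rw [List.mem_range'_1] at hj
  simp [h j hj.1 hj.2]

theorem starts_eq (cs : List Char) (i : Nat) (inv : i = 0 ∨ Dg cs (i - 1) = false) :
    (pyOuterWhile cs i).1 = (List.range' i (cs.length - i)).filter (predS cs) := by
  by_cases hi : i < cs.length
  · by_cases hd : Dg cs i = true
    · have hge := firstStop_ge cs (i + 1)
      have hle := firstStop_le cs (i + 1) (by omega)
      have hfd := firstStop_nondigit cs (i + 1)
      set fs := firstStop cs (i + 1) with hfs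
      set k := min (fs + 1) cs.length with hk
      rw [pyOuterWhile, if_pos hi, show PySem.Chars.isdigit (cs.getD i ' ') = true from hd]
      simp only [if_true, pyInnerWhile_eq_firstStop cs i hd, ← hfs]
      have hsplit : cs.length - i = (k - i) + (cs.length - k) := by omega
      rw [hsplit]
      rw [← List.range'_append]
      rw [show i + 1 * (k - i) = k from by omega]
      rw [List.filter_append]
      have hki : k - i = (k - i - 1) + 1 := by omega
      rw [hki, List.range'_succ, List.filter_cons]
      have hps : predS cs i = true := by
        unfold predS
        rcases inv with h0 | hnd
        · subst h0; simp [hd]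
        · simp [hd, hnd]
      rw [if_pos (by simp [hps])]
      have hmid : (List.range' (i + 1) (k - i - 1)).filter (predS cs) = [] := by
        apply filter_range'_nil
        intro j hj1 hj2
        have hjk : j < k := by omega
        by_cases hjf : j = fs
        · unfold predS; subst hjf; simp [hfd]
        · have hjlt : j < fs := by omega
          have hdj1 : Dg cs (j - 1) = true := by
            rcases Nat.eq_or_lt_of_le hj1 with h | h
            · rw [show j - 1 = i from by omega]; exact hd
            · exact firstStop_digit cs (i + 1) (j - 1) (by omega) (by omega)
          unfold predS
          simp [hdj1, show ¬ j = 0 from by omega]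
      rw [hmid]
      have htail : (List.range' k (cs.length - k)).filter (predS cs) = (pyOuterWhile cs (fs + 1)).1 := by
        by_cases hfl : fs < cs.length
        · have : k = fs + 1 := by omega
          rw [this, ← starts_eq cs (fs + 1) (Or.inr (by simpa using hfd))]
        · have hk2 : k = cs.length := by omega
          rw [hk2, Nat.sub_self]
          rw [pyOuterWhile, if_neg (by omega)]
          rfl
      rw [htail]
      simp
    · rw [pyOuterWhile, if_pos hi, show PySem.Chars.isdigit (cs.getD i ' ') = false from eq_false_of_ne_true hd]
      simp only [Bool.false_eq_true, reduceIte]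
      rw [starts_eq cs (i + 1) (Or.inr (by simpa using eq_false_of_ne_true hd))]
      rw [show cs.length - i = (cs.length - (i + 1)) + 1 from by omega, List.range'_succ, List.filter_cons]
      rw [if_neg (by unfold predS; simp [eq_false_of_ne_true hd])]
  · rw [pyOuterWhile, if_neg hi, show cs.length - i = 0 from by omega]
    simp
termination_by cs.length - i
decreasing_by
  · have := firstStop_ge cs (i + 1); omega
  · omega

theorem ends_eq (cs : List Char) (i : Nat) :
    (pyOuterWhile cs i).2 = (List.range' i (cs.length - i)).filter (predE cs) := by
  by_cases hi : i < cs.length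
  · by_cases hd : Dg cs i = true
    · have hge := firstStop_ge cs (i + 1)
      have hle := firstStop_le cs (i + 1) (by omega)
      have hfd := firstStop_nondigit cs (i + 1)
      set fs := firstStop cs (i + 1) with hfs
      set k := min (fs + 1) cs.length with hk
      rw [pyOuterWhile, if_pos hi, show PySem.Chars.isdigit (cs.getD i ' ') = true from hd]
      simp only [if_true, pyInnerWhile_eq_firstStop cs i hd, ← hfs]
      have hsplit : cs.length - i = ((fs - 1 - i) + (1 + (k - fs))) + (cs.length - k) := by omega
      rw [hsplit, ← List.range'_append, ← List.range'_append]
      rw [show i + 1 * (fs - 1 - i) = fs - 1 from by omega,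
          show i + 1 * (fs - 1 - i + (1 + (k - fs))) = k from by omega]
      rw [List.filter_append, List.filter_append]
      have hpre : (List.range' i (fs - 1 - i)).filter (predE cs) = [] := by
        apply filter_range'_nil
        intro j hj1 hj2
        have hdj1 : Dg cs (j + 1) = true :=
          firstStop_digit cs (i + 1) (j + 1) (by omega) (by omega)
        unfold predE
        simp [hdj1, show ¬ j = cs.length - 1 from by omega]
      rw [hpre]
      rw [show 1 + (k - fs) = (k - fs) + 1 from by omega, List.range'_succ, List.filter_cons]
      have hpfs : predE cs (fs - 1) = true := by
        have hdfs1 : Dg cs (fs - 1) = true := by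
          rcases Nat.eq_or_lt_of_le hge with h | h
          · rw [show fs - 1 = i from by omega]; exact hd
          · exact firstStop_digit cs (i + 1) (fs - 1) (by omega) (by omega)
        unfold predE
        rw [show fs - 1 + 1 = fs from by omega]
        simp [hdfs1, hfd]
      rw [if_pos (by simp [hpfs])]
      have hmid : (List.range' (fs - 1 + 1) (k - fs)).filter (predE cs) = [] := by
        apply filter_range'_nil
        intro j hj1 hj2
        have : j = fs := by omega
        unfold predE; subst this; simp [hfd]
      rw [hmid]
      have htail : (List.range' k (cs.length - k)).filter (predE cs) = (pyOuterWhile cs (fs + 1)).2 := by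
        by_cases hfl : fs < cs.length
        · have : k = fs + 1 := by omega
          rw [this, ← ends_eq cs (fs + 1)]
        · have hk2 : k = cs.length := by omega
          rw [hk2, Nat.sub_self]
          rw [pyOuterWhile, if_neg (by omega)]
          rfl
      rw [htail]
      simp
    · rw [pyOuterWhile, if_pos hi, show PySem.Chars.isdigit (cs.getD i ' ') = false from eq_false_of_ne_true hd]
      simp only [Bool.false_eq_true, reduceIte]
      rw [ends_eq cs (i + 1)]
      rw [show cs.length - i = (cs.length - (i + 1)) + 1 from by omega, List.range'_succ, List.filter_cons]
      rw [if_neg (by unfold predE; simp [eq_false_of_ne_true hd])]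
  · rw [pyOuterWhile, if_neg hi, show cs.length - i = 0 from by omega]
    simp
termination_by cs.length - i
decreasing_by
  · have := firstStop_ge cs (i + 1); omega
  · omega

-- bridge: B's precomputed mask d = cs.map isdigit indexes like Dg on every index
theorem mask_getD (cs : List Char) (j : Nat) :
    (cs.map PySem.Chars.isdigit).getD j false = Dg cs j := by
  unfold Dg
  by_cases h : j < cs.length
  · rw [List.getD_eq_getElem _ _ (by simpa using h), List.getD_eq_getElem _ _ h, List.getElem_map]
  · rw [List.getD_eq_default _ _ (by simpa using Nat.le_of_not_lt h),
        List.getD_eq_default _ _ (Nat.le_of_not_lt h)]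
    simp [PySem.Chars.isdigit]

theorem line_eq (line : String) : get_line_island line = bLineSpans line := by
  unfold get_line_island bLineSpans
  rw [PySem.List.foldl_append_singleton_eq_self]
  simp only [List.nil_append]
  rw [starts_eq line.toList 0 (Or.inl rfl), ends_eq line.toList 0]
  rw [List.range_eq_range']
  congr 1
  · apply List.filter_congr
    intro j _
    simp only [predS, mask_getD]
  · apply List.filter_congr
    intro j _
    simp only [predE, mask_getD]

-- ===== VERDICT (by name: the statement is the Claim_ definition above) =====
theorem get_islands_spec : Claim_equal_get_islands := by
  intro gb _
  unfold Spec_get_islands get_islands get_islands_alt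
  simp only [PySem.List.foldl_append_singleton_eq_map]
  rw [PySem.List.foldl_append_eq_flatMap]
  rw [PySem.List.enumerate_eq_map_pyRange gb ""]
  rw [List.flatMap_map]
  simp only [List.nil_append, PySem.List.len_eq, line_eq]
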